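-- pv_equiv track=rewrite | github.com/spsalmon/towbintools_pipeline | analysis_and_plots/plotting_functions/utils_plotting.py | build_legend
-- ===== SOURCE A (Python) =====
-- def build_legend(single_condition_dict, legend):
--     if legend is None:
--         return f'Condition {int(single_condition_dict["condition_id"])}'
--     else:
--         legend_string = ""
--         for i, (key, value) in enumerate(legend.items()):
--             if value:
--                 legend_string += f"{single_condition_dict[key]} {value}"
--             else:
--                 legend_string += f"{single_condition_dict[key]}"
--             if i < len(legend) - 1:
--                 legend_string += ", "
--         return legend_string
-- ===== SOURCE B (Python) =====
-- def build_legend(single_condition_dict, legend):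
--     if legend is None:
--         return f'Condition {int(single_condition_dict["condition_id"])}'
--
--     def rec(items):
--         if not items:
--             return ""
--         (key, value), rest = items[0], items[1:]
--         piece = f"{single_condition_dict[key]} {value}" if value else f"{single_condition_dict[key]}"
--         if not rest:
--             return piece
--         return piece + ", " + rec(rest)
--
--     return rec(list(legend.items()))
-- ===== Notes on version B (the rewrite author's own statement) =====
-- stated objective: alternative
-- what changed: Replaces A's indexed accumulator loop with its trailing 'if i < len(legend)-1' separator branch by a structural recursion over the item list that emits the head piece and prepends ', ' before the recursive result for a nonempty tail.
import Mathlib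
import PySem

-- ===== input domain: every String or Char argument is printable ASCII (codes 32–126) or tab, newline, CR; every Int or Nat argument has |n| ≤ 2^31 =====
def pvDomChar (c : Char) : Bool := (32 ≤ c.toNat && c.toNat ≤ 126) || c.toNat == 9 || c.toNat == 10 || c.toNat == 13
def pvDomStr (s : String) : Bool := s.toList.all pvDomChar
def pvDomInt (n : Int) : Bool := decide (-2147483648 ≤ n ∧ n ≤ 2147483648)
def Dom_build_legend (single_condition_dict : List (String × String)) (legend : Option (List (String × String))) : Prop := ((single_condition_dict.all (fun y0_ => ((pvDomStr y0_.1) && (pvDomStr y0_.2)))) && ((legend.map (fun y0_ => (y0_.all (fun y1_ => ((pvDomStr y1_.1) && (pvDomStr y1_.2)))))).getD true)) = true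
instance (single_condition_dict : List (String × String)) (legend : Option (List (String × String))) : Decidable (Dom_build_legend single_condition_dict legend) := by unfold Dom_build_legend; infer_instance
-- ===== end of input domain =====

-- B replaces A's indexed accumulator loop with manual separator interleaving by a structural
-- recursion over the item list (head piece, ", " prepended before a nonempty tail); same cost.

-- ===== PORT A =====
def build_legend (single_condition_dict : List (String × String)) (legend : Option (List (String × String))) : String :=
  match legend with
  | none =>
    -- f'Condition {int(single_condition_dict["condition_id"])}'; KeyError/ValueError excluded by Pre_
    match ((PySem.Dict.ofList single_condition_dict).get? "condition_id").bind PySem.Int.ofStr? with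
    | some n => "Condition " ++ PySem.Int.toStr n
    | none => ""
  | some l =>
    let D := PySem.Dict.ofList single_condition_dict
    let L := PySem.Dict.ofList l
    (PySem.List.enumerate L.items).foldl (fun legend_string ikv =>
      let legend_string :=
        if ikv.2.2 ≠ "" then legend_string ++ ((D.get? ikv.2.1).getD "" ++ " " ++ ikv.2.2)
        else legend_string ++ (D.get? ikv.2.1).getD ""
      if ikv.1 < (L.size : Int) - 1 then legend_string ++ ", " else legend_string) ""

-- ===== PORT B =====
-- the inner 'rec' of Source B: head piece, then ", " ++ rec rest when the tail is nonempty
def build_legend_rec (D : PySem.Dict String String) : List (String × String) → String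
  | [] => ""
  | (k, v) :: rest =>
    let piece := if v ≠ "" then (D.get? k).getD "" ++ " " ++ v else (D.get? k).getD ""
    match rest with
    | [] => piece
    | _ :: _ => piece ++ ", " ++ build_legend_rec D rest

def build_legend_alt (single_condition_dict : List (String × String)) (legend : Option (List (String × String))) : String :=
  match legend with
  | none =>
    match ((PySem.Dict.ofList single_condition_dict).get? "condition_id").bind PySem.Int.ofStr? with
    | some n => "Condition " ++ PySem.Int.toStr n
    | none => ""
  | some l =>
    build_legend_rec (PySem.Dict.ofList single_condition_dict) (PySem.Dict.ofList l).items

-- ===== PRECONDITION & SPEC =====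
-- Pre_ excludes exactly the inputs where the Python A raises: with legend None, a missing or
-- non-int-parsable "condition_id" (KeyError/ValueError); with a legend, a legend key missing
-- from single_condition_dict (KeyError).
def Pre_build_legend (single_condition_dict : List (String × String)) (legend : Option (List (String × String))) : Prop :=
  (match legend with
   | none => (((PySem.Dict.ofList single_condition_dict).get? "condition_id").bind PySem.Int.ofStr?).isSome
   | some l => l.all (fun p => (PySem.Dict.ofList single_condition_dict).contains p.1)) = true

instance (single_condition_dict : List (String × String)) (legend : Option (List (String × String))) : Decidable (Pre_build_legend single_condition_dict legend) := by
  unfold Pre_build_legend; infer_instance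

def pvWitness_build_legend : (List (String × String)) × (Option (List (String × String))) :=
  ([("strain", "wt"), ("temp", "20")], some [("strain", ""), ("temp", "C")])

def Spec_build_legend (single_condition_dict : List (String × String)) (legend : Option (List (String × String))) (out : String) : Prop := out = build_legend_alt single_condition_dict legend
instance (single_condition_dict : List (String × String)) (legend : Option (List (String × String))) (out : String) : Decidable (Spec_build_legend single_condition_dict legend out) := by unfold Spec_build_legend; infer_instance

-- ===== CLAIM (what is proved, stated in full; the proofs are below) =====
def Claim_equal_build_legend : Prop := ∀ (single_condition_dict : List (String × String)) (legend : Option (List (String × String))), Dom_build_legend single_condition_dict legend → Pre_build_legend single_condition_dict legend → Spec_build_legend single_condition_dict legend (build_legend single_condition_dict legend)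

-- ===== LEMMAS AND PROOFS =====

-- A's separator-interleaving loop over enumerated items equals B's structural recursion.
theorem foldl_enum_sep_eq_rec (D : PySem.Dict String String) :
    ∀ (items : List (String × String)) (s : Int) (n : Int) (acc : String),
      s + items.length = n →
      (PySem.List.enumerate items s).foldl (fun a ikv =>
        let a := if ikv.2.2 ≠ "" then a ++ ((D.get? ikv.2.1).getD "" ++ " " ++ ikv.2.2)
                 else a ++ (D.get? ikv.2.1).getD ""
        if ikv.1 < n - 1 then a ++ ", " else a) acc
      = acc ++ build_legend_rec D items := by
  intro items
  induction items with
  | nil =>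
    intro s n acc h
    simp [PySem.List.enumerate_nil, build_legend_rec]
  | cons p rest ih =>
    intro s n acc h
    obtain ⟨k, v⟩ := p
    rw [PySem.List.enumerate_cons]
    simp only [List.foldl_cons]
    cases rest with
    | nil =>
      have hs : ¬ (s < n - 1) := by simp at h; omega
      by_cases hv : v ≠ "" <;>
        simp [hs, hv, PySem.List.enumerate_nil, build_legend_rec]
    | cons q rs =>
      have hs : s < n - 1 := by simp at h; omega
      have hn : s + 1 + (q :: rs).length = n := by simp at h ⊢; omega
      by_cases hv : v ≠ ""
      · simp only [hv, ne_eq, if_pos hs]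
        rw [ih (s + 1) n _ hn]
        simp [build_legend_rec, hv, String.append_assoc]
      · simp only [hv, if_pos hs]
        rw [ih (s + 1) n _ hn]
        simp [build_legend_rec, hv, String.append_assoc]

-- ===== VERDICT (by name: the statement is the Claim_ definition above) =====
theorem build_legend_spec : Claim_equal_build_legend := by
  intro d legend _ _
  unfold Spec_build_legend build_legend build_legend_alt
  cases legend with
  | none => rfl
  | some l =>
    simp only
    rw [foldl_enum_sep_eq_rec (PySem.Dict.ofList d) (PySem.Dict.ofList l).items 0
        ((PySem.Dict.ofList l).size : Int) "" (by simp [PySem.Dict.size])]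
    simp
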